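-- pv_equiv track=rewrite | github.com/jpereiranet/roughprofiler | home.py | defineExtensions
-- ===== SOURCE A (Python) =====
-- def defineExtensions(exts):
--     '''
--     Create extension from configuration
--     :param exts:
--     :return:
--     '''
--     extensions = exts.split(sep=",")
--     s = []
--     r = []
--     for ext in extensions:
--         s.append("*."+ext.replace(" ", ""))
--         s.append("*." + ext.replace(" ", "").upper() )
--         r.append(ext.replace(" ", ""))
--         r.append(ext.replace(" ", "").upper())
--
--     cadena = " ".join(s)
--     return cadena, r
-- ===== SOURCE B (Python) =====
-- def defineExtensions(exts):
--     # B: single character-level scan (state machine): split on ',' and drop spaces in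
--     # one pass without str.split/str.replace; then expand tokens to (token, TOKEN)
--     # and join the glob pieces.
--     tokens = []
--     cur = []
--     for ch in exts:
--         if ch == ',':
--             tokens.append(''.join(cur))
--             cur = []
--         elif ch != ' ':
--             cur.append(ch)
--     tokens.append(''.join(cur))
--     r = []
--     for t in tokens:
--         r.append(t)
--         r.append(t.upper())
--     cadena = ' '.join('*.' + x for x in r)
--     return cadena, r
-- ===== Notes on version B (the rewrite author's own statement) =====
-- stated objective: alternative
-- what changed: B is a single character-level state machine that splits on commas and drops spaces in one pass over the string (no str.split and no per-token str.replace), then expands each token to its lower/upper pair and joins the glob pieces.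
import Mathlib
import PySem

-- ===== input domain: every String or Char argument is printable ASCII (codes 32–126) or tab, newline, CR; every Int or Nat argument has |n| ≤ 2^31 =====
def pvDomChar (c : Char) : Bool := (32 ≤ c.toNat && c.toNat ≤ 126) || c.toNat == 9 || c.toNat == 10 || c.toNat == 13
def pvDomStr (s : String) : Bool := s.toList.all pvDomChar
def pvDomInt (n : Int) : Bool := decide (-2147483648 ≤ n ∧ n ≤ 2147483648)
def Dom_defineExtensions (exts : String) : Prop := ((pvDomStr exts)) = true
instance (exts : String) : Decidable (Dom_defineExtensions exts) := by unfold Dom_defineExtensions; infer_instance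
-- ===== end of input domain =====

-- B replaces A's split/replace passes by a single character-level scan (a small state machine
-- splitting on ',' and dropping spaces in one pass); same return value (alternative decomposition).

-- ===== PORT A =====
def defineExtensions (exts : String) : String × List String :=
  let extensions := (PySem.Str.split? exts ",").getD []
  let sr := extensions.foldl (fun (acc : List String × List String) ext =>
      (acc.1 ++ ["*." ++ PySem.Str.replace ext " " "",
                 "*." ++ PySem.Str.upper (PySem.Str.replace ext " " "")],
       acc.2 ++ [PySem.Str.replace ext " " "",
                 PySem.Str.upper (PySem.Str.replace ext " " "")])) ([], [])
  (PySem.Str.join " " sr.1, sr.2)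

-- ===== PORT B =====
-- char-level state machine: tokens so far, current (space-free) token
def defineExtensions_alt (exts : String) : String × List String :=
  let st := exts.toList.foldl (fun (st : List String × List Char) ch =>
      if ch = ',' then (st.1 ++ [String.ofList st.2], [])
      else if ch = ' ' then st
      else (st.1, st.2 ++ [ch])) ([], [])
  let tokens := st.1 ++ [String.ofList st.2]
  let r := tokens.foldl (fun r t => r ++ [t, PySem.Str.upper t]) []
  (PySem.Str.join " " (r.map (fun x => "*." ++ x)), r)

-- ===== PRECONDITION & SPEC =====
def Spec_defineExtensions (exts : String) (out : String × List String) : Prop := out = defineExtensions_alt exts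
instance (exts : String) (out : String × List String) : Decidable (Spec_defineExtensions exts out) := by unfold Spec_defineExtensions; infer_instance

-- ===== CLAIM (what is proved, stated in full; the proofs are below) =====
def Claim_equal_defineExtensions : Prop := ∀ (exts : String), Dom_defineExtensions exts → Spec_defineExtensions exts (defineExtensions exts)

-- ===== LEMMAS AND PROOFS =====

/-- drop the spaces of a token -/
def pvClean (t : List Char) : List Char := t.filter (fun c => c != ' ')

/-- apply f to the head piece only -/
def pvMapHead (f : List Char → List Char) : List (List Char) → List (List Char)
  | [] => []
  | h :: r => f h :: r

/-- structural split on ',' -/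
def pvSplit : List Char → List (List Char)
  | [] => [[]]
  | c :: t => if c = ',' then [] :: pvSplit t else pvMapHead (fun h => c :: h) (pvSplit t)

theorem pvSplit_ne_nil (l : List Char) : pvSplit l ≠ [] := by
  cases l with
  | nil => simp [pvSplit]
  | cons c t =>
      simp only [pvSplit]
      split
      · simp
      · cases h : pvSplit t with
        | nil => exact absurd h (pvSplit_ne_nil t)
        | cons hd tl => simp [pvMapHead]

theorem pvReplaceGo (l : List Char) : ∀ (fuel : Nat) (acc : List Char), l.length ≤ fuel →
    PySem.Chars.replace.go [' '] [] fuel l acc = acc.reverse ++ pvClean l := by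
  induction l with
  | nil => intro fuel acc _; cases fuel <;> simp [PySem.Chars.replace.go, pvClean]
  | cons c t ih =>
      intro fuel acc hf
      cases fuel with
      | zero => simp at hf
      | succ f =>
          have hlen : t.length ≤ f := by simp at hf; omega
          by_cases hc : c = ' '
          · subst hc
            have hp : ([' '] : List Char).isPrefixOf (' ' :: t) = true := by
              simp [List.isPrefixOf]
            simp [PySem.Chars.replace.go, hp, ih f acc hlen, pvClean]
          · have hp : ([' '] : List Char).isPrefixOf (c :: t) = false := by
              simp [List.isPrefixOf]; exact fun h => hc h.symm
            simp [PySem.Chars.replace.go, hp, ih f (c :: acc) hlen, pvClean, hc]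

theorem pvReplaceSpaces (t : List Char) : PySem.Chars.replace t [' '] [] = pvClean t := by
  simpa [PySem.Chars.replace] using pvReplaceGo t t.length [] le_rfl

theorem pvSplitGo (l : List Char) : ∀ (fuel : Nat) (cur : List Char) (acc : List (List Char)),
    l.length ≤ fuel →
    PySem.Chars.splitOn.go [','] fuel l cur acc
      = acc.reverse ++ pvMapHead (fun h => cur.reverse ++ h) (pvSplit l) := by
  induction l with
  | nil =>
      intro fuel cur acc _
      cases fuel <;> simp [PySem.Chars.splitOn.go, pvSplit, pvMapHead]
  | cons c t ih =>
      intro fuel cur acc hf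
      cases fuel with
      | zero => simp at hf
      | succ f =>
          have hlen : t.length ≤ f := by simp at hf; omega
          by_cases hc : c = ','
          · subst hc
            have hp : ([','] : List Char).isPrefixOf (',' :: t) = true := by
              simp [List.isPrefixOf]
            cases h : pvSplit t with
            | nil => exact absurd h (pvSplit_ne_nil t)
            | cons hd tl =>
                simp [PySem.Chars.splitOn.go, hp, ih f [] (cur.reverse :: acc) hlen,
                      pvSplit, h, pvMapHead]
          · have hp : ([','] : List Char).isPrefixOf (c :: t) = false := by
              simp [List.isPrefixOf]; exact fun h => hc h.symm
            cases h : pvSplit t with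
            | nil => exact absurd h (pvSplit_ne_nil t)
            | cons hd tl =>
                simp [PySem.Chars.splitOn.go, hp, ih f (c :: cur) acc hlen,
                      pvSplit, hc, h, pvMapHead]

theorem pvSplitOnComma (cs : List Char) : PySem.Chars.splitOn cs [','] = pvSplit cs := by
  rw [PySem.Chars.splitOn, pvSplitGo cs (cs.length + 1) [] [] (by omega)]
  cases h : pvSplit cs with
  | nil => exact absurd h (pvSplit_ne_nil cs)
  | cons hd tl => simp [pvMapHead]

/-- B's scan, flushed, is the split of the input with every piece cleaned. -/
theorem pvScan (cs : List Char) : ∀ (acc : List String) (cur : List Char),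
    (cs.foldl (fun (st : List String × List Char) ch =>
        if ch = ',' then (st.1 ++ [String.ofList st.2], [])
        else if ch = ' ' then st
        else (st.1, st.2 ++ [ch])) (acc, cur)).1
      ++ [String.ofList (cs.foldl (fun (st : List String × List Char) ch =>
        if ch = ',' then (st.1 ++ [String.ofList st.2], [])
        else if ch = ' ' then st
        else (st.1, st.2 ++ [ch])) (acc, cur)).2]
      = acc ++ (pvMapHead (fun h => cur ++ h) ((pvSplit cs).map pvClean)).map String.ofList := by
  induction cs with
  | nil => intro acc cur; simp [pvSplit, pvMapHead, pvClean]
  | cons c t ih =>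
      intro acc cur
      by_cases hc : c = ','
      · subst hc
        simp only [List.foldl_cons, reduceIte]
        rw [ih (acc ++ [String.ofList cur]) []]
        cases h : pvSplit t with
        | nil => exact absurd h (pvSplit_ne_nil t)
        | cons hd tl => simp [pvSplit, h, pvMapHead, pvClean]
      · by_cases hs : c = ' '
        · subst hs
          simp only [List.foldl_cons, reduceIte, if_neg hc]
          rw [ih acc cur]
          cases h : pvSplit t with
          | nil => exact absurd h (pvSplit_ne_nil t)
          | cons hd tl =>
              simp [pvSplit, h, pvMapHead, pvClean, List.filter]
        · simp only [List.foldl_cons, if_neg hc, if_neg hs]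
          rw [ih acc (cur ++ [c])]
          cases h : pvSplit t with
          | nil => exact absurd h (pvSplit_ne_nil t)
          | cons hd tl =>
              simp [pvSplit, hc, h, pvMapHead, pvClean, List.filter, show (c != ' ') = true by simp [hs]]

/-- A's interleaved fold: the s-accumulator is the map of "*." ++ · over the r-accumulator,
    and r is the flatMap of the (clean, CLEAN) pair. -/
theorem pvInvA (l : List String) (s r : List String)
    (h : s = r.map (fun x => "*." ++ x)) :
    (l.foldl (fun (acc : List String × List String) ext =>
      (acc.1 ++ ["*." ++ PySem.Str.replace ext " " "",
                 "*." ++ PySem.Str.upper (PySem.Str.replace ext " " "")],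
       acc.2 ++ [PySem.Str.replace ext " " "",
                 PySem.Str.upper (PySem.Str.replace ext " " "")])) (s, r))
    = ((r ++ l.flatMap (fun ext => [PySem.Str.replace ext " " "",
          PySem.Str.upper (PySem.Str.replace ext " " "")])).map (fun x => "*." ++ x),
       r ++ l.flatMap (fun ext => [PySem.Str.replace ext " " "",
          PySem.Str.upper (PySem.Str.replace ext " " "")])) := by
  induction l generalizing s r with
  | nil => simp [h]
  | cons a t ih =>
      simp only [List.foldl_cons]
      rw [ih _ _ (by simp [h])]
      simp

theorem pvStrReplaceOfList (t : List Char) :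
    PySem.Str.replace (String.ofList t) " " "" = String.ofList (pvClean t) := by
  simp [PySem.Str.replace, pvReplaceSpaces]

theorem defineExtensions_spec : Claim_equal_defineExtensions := by
  intro exts _
  unfold Spec_defineExtensions defineExtensions defineExtensions_alt
  dsimp only
  rw [show (PySem.Str.split? exts ",").getD [] = (pvSplit exts.toList).map String.ofList by
        simp [PySem.Str.split?, PySem.Chars.split?, show ("," : String).toList = [','] from rfl,
              pvSplitOnComma]]
  rw [pvInvA _ [] [] rfl]
  rw [pvScan exts.toList [] []]
  rw [PySem.List.foldl_append_eq_flatMap]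
  cases h : pvSplit exts.toList with
  | nil => exact absurd h (pvSplit_ne_nil exts.toList)
  | cons hd tl =>
      simp only [pvMapHead, List.map_cons, List.nil_append, List.flatMap_cons, List.map_map,
        List.flatMap_map, List.nil_append]
      simp [pvStrReplaceOfList, Function.comp]
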